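-- pv_equiv track=rewrite | github.com/AkashKawade/DSA-Question-and-Answers- | ckeck_palindrome.py | palindromes
-- ===== SOURCE A (Python) =====
-- def palindromes(input_string):
--     store_strg = []
--     n = len(input_string)
--     for i in range(n):
--         for j in range(i+1, n+1):
--             newstring = input_string[i:j]
--             if newstring == newstring[::-1] and len(newstring) > 1:
--                 store_strg.append(newstring)
--     return store_strg
-- ===== SOURCE B (Python) =====
-- def palindromes(input_string):
--     s = input_string
--     n = len(s)
--     pal = {}
--     for i in range(n + 1):
--         pal[(i, i)] = True
--     for i in range(n):
--         pal[(i, i + 1)] = True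
--     for L in range(2, n + 1):
--         for i in range(n - L + 1):
--             j = i + L
--             pal[(i, j)] = s[i] == s[j - 1] and pal[(i + 1, j - 1)]
--     return [s[i:j] for i in range(n) for j in range(i + 2, n + 1) if pal[(i, j)]]
-- ===== Notes on version B (the rewrite author's own statement) =====
-- stated objective: alternative
-- what changed: A tests every substring from scratch by materialising the slice and its reversal and comparing them; B fills a dynamic-programming table pal[(i,j)] by increasing length (pal[(i,j)] = chars match and pal[(i+1,j-1)]) and then emits the same substrings in the same order by table lookup.
import Mathlib
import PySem

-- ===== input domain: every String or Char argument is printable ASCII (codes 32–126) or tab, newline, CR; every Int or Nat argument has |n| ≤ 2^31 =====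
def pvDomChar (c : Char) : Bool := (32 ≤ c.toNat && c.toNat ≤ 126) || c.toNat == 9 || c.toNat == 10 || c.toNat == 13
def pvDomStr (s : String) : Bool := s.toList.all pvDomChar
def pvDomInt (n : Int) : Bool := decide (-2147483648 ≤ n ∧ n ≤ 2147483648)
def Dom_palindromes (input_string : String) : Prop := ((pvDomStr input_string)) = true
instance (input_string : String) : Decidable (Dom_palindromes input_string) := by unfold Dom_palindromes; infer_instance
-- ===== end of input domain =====

-- B replaces A's per-substring slice-reverse-compare test by a dynamic-programming table
-- pal[(i,j)] filled by increasing length, then emits the substrings in the same order.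

-- ===== PORT A =====
def palindromes (input_string : String) : List String :=
  let s := input_string.toList
  let n : Int := (s.length : Int)
  (PySem.List.pyRange 0 n 1).foldl (fun store_strg i =>
    (PySem.List.pyRange (i + 1) (n + 1) 1).foldl (fun store_strg j =>
      let newstring := PySem.List.slice s (some i) (some j)
      -- newstring[::-1] is newstring.reverse (PySem.List.slice?_none_none_neg_one)
      if newstring = newstring.reverse ∧ 1 < newstring.length then
        store_strg ++ [String.ofList newstring]
      else store_strg) store_strg) []

-- ===== PORT B =====
-- Source B's first loop: pal[(i, i)] = True for i in range(n + 1)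
def palBase0 (s : List Char) : PySem.Dict (Int × Int) Bool :=
  (PySem.List.pyRange 0 ((s.length : Int) + 1) 1).foldl
    (fun pal i => PySem.Dict.insert pal (i, i) true) PySem.Dict.empty

-- Source B's second loop: pal[(i, i + 1)] = True for i in range(n)
def palBase1 (s : List Char) : PySem.Dict (Int × Int) Bool :=
  (PySem.List.pyRange 0 (s.length : Int) 1).foldl
    (fun pal i => PySem.Dict.insert pal (i, i + 1) true) (palBase0 s)

-- Source B's DP loop over lengths L = 2 .. n; Python's 'pal[(i + 1, j - 1)]' always finds its
-- key (every pair with 0 ≤ i ≤ j ≤ n and j - i ≤ L - 1 is present, cf. GoodUpTo below),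
-- so 'getD … false' is exact here.
def palTable (s : List Char) : PySem.Dict (Int × Int) Bool :=
  (PySem.List.pyRange 2 ((s.length : Int) + 1) 1).foldl (fun pal L =>
    (PySem.List.pyRange 0 ((s.length : Int) - L + 1) 1).foldl (fun pal i =>
      let j := i + L
      PySem.Dict.insert pal (i, j)
        (decide (PySem.List.pyGet? s i = PySem.List.pyGet? s (j - 1)) &&
          PySem.Dict.getD pal (i + 1, j - 1) false)) pal) (palBase1 s)

def palindromes_alt (input_string : String) : List String :=
  let s := input_string.toList
  let n : Int := (s.length : Int)
  (PySem.List.pyRange 0 n 1).foldl (fun result i =>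
    (PySem.List.pyRange (i + 2) (n + 1) 1).foldl (fun result j =>
      if PySem.Dict.getD (palTable s) (i, j) false then
        result ++ [String.ofList (PySem.List.slice s (some i) (some j))]
      else result) result) []

-- ===== PRECONDITION & SPEC =====
def Spec_palindromes (input_string : String) (out : List String) : Prop := out = palindromes_alt input_string
instance (input_string : String) (out : List String) : Decidable (Spec_palindromes input_string out) := by unfold Spec_palindromes; infer_instance

-- ===== CLAIM (what is proved, stated in full; the proofs are below) =====
def Claim_equal_palindromes : Prop := ∀ (input_string : String), Dom_palindromes input_string → Spec_palindromes input_string (palindromes input_string)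

-- ===== LEMMAS AND PROOFS =====

-- a list of length ≤ 1 is a palindrome
lemma short_pal {α : Type} (l : List α) (h : l.length ≤ 1) : l = l.reverse := by
  match l, h with
  | [], _ => rfl
  | [a], _ => rfl

-- decomposition of the slice into first char, middle, last char
lemma slice_decomp (s : List Char) (a b : Nat) (hab : a + 1 < b) (hb : b ≤ s.length) :
    (s.drop a).take (b - a) =
      s[a]'(by omega) :: (((s.drop (a+1)).take (b - a - 2)) ++ [s[b-1]'(by omega)]) := by
  have h1 : s.drop a = s[a]'(by omega) :: s.drop (a+1) := List.drop_eq_getElem_cons (by omega)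
  rw [h1]
  have h2 : b - a = (b - a - 2) + 1 + 1 := by omega
  rw [h2, List.take_succ_cons]
  congr 1
  rw [List.take_add_one]
  congr 1
  rw [List.getElem?_drop]
  have h3 : a + 1 + (b - a - 2) = b - 1 := by omega
  rw [h3, List.getElem?_eq_getElem (by omega)]
  rfl

-- "s[a:b] equals its own reversal", as one Bool
def isPalSpec (s : List Char) (a b : Int) : Bool :=
  decide (PySem.List.slice s (some a) (some b) = (PySem.List.slice s (some a) (some b)).reverse)

lemma isPal_short (s : List Char) (a b : Int) (h0 : 0 ≤ a) (hab : a ≤ b) (hb : b ≤ a + 1) :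
    isPalSpec s a b = true := by
  unfold isPalSpec
  rw [PySem.List.slice_toNat s (by omega) (by omega), decide_eq_true_iff]
  exact short_pal _ (by rw [List.length_take, List.length_drop]; omega)

-- peeling one layer off the palindrome predicate
lemma pal_step (s : List Char) (i j : Int) (h0 : 0 ≤ i) (h2 : i + 2 ≤ j) (hj : j ≤ (s.length : Int)) :
    isPalSpec s i j =
      (decide (PySem.List.pyGet? s i = PySem.List.pyGet? s (j - 1)) && isPalSpec s (i + 1) (j - 1)) := by
  have ha' : i.toNat < s.length := by omega
  have hb' : j.toNat - 1 < s.length := by omega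
  have g1 : PySem.List.pyGet? s i = some (s[i.toNat]'ha') := by
    have e : i = ((i.toNat : Nat) : Int) := by omega
    conv_lhs => rw [e]
    rw [PySem.List.pyGet?_natCast, List.getElem?_eq_getElem ha']
  have g2 : PySem.List.pyGet? s (j - 1) = some (s[j.toNat - 1]'hb') := by
    have e : j - 1 = ((j.toNat - 1 : Nat) : Int) := by omega
    conv_lhs => rw [e]
    rw [PySem.List.pyGet?_natCast, List.getElem?_eq_getElem hb']
  unfold isPalSpec
  rw [PySem.List.slice_toNat s (by omega) (by omega),
      PySem.List.slice_toNat s (by omega) (by omega)]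
  have e1 : (i + 1).toNat = i.toNat + 1 := by omega
  have e2 : (j - 1).toNat = j.toNat - 1 := by omega
  rw [e1, e2]
  rw [slice_decomp s i.toNat j.toNat (by omega) (by omega), g1, g2]
  have e3 : j.toNat - 1 - (i.toNat + 1) = j.toNat - i.toNat - 2 := by omega
  rw [e3]
  by_cases hc : s[i.toNat]'ha' = s[j.toNat - 1]'hb'
  · simp [hc]
  · simp [hc]

-- invariant: the table holds exactly the valid pairs of length ≤ M, with the palindrome verdict
def GoodUpTo (s : List Char) (d : PySem.Dict (Int × Int) Bool) (M : Int) : Prop :=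
  ∀ a b : Int, PySem.Dict.getD d (a, b) false =
    (decide (0 ≤ a ∧ a ≤ b ∧ b ≤ (s.length : Int) ∧ b - a ≤ M) && isPalSpec s a b)

lemma fold_diag0 (s : List Char) (m : Nat) : ∀ (lo : Int) (d : PySem.Dict (Int × Int) Bool),
    ((s.length : Int) + 1 - lo).toNat = m → 0 ≤ lo →
    (∀ a b : Int, PySem.Dict.getD d (a, b) false = decide (0 ≤ a ∧ a < lo ∧ b = a)) →
    ∀ a b : Int, PySem.Dict.getD ((PySem.List.pyRange lo ((s.length : Int) + 1) 1).foldl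
        (fun pal i => PySem.Dict.insert pal (i, i) true) d) (a, b) false
      = decide (0 ≤ a ∧ (a < lo ∨ a ≤ (s.length : Int)) ∧ b = a) := by
  induction m using Nat.strong_induction_on with
  | _ m ih =>
    intro lo d hm hlo hd a b
    by_cases hend : (s.length : Int) + 1 ≤ lo
    · rw [PySem.List.pyRange_one_eq_nil hend, List.foldl_nil, hd a b]
      rw [decide_eq_decide]; omega
    · rw [PySem.List.pyRange_one_cons (by omega), List.foldl_cons]
      have step : ∀ a b : Int,
          PySem.Dict.getD (PySem.Dict.insert d (lo, lo) true) (a, b) false =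
            decide (0 ≤ a ∧ a < lo + 1 ∧ b = a) := by
        intro a b
        rw [PySem.Dict.getD_insert]
        by_cases hk : ((a, b) : Int × Int) = (lo, lo)
        · obtain ⟨rfl, rfl⟩ : a = lo ∧ b = lo := by simpa [Prod.ext_iff] using hk
          rw [if_pos rfl]; symm; rw [decide_eq_true_iff]
          exact ⟨hlo, by omega, rfl⟩
        · rw [if_neg hk, hd a b, decide_eq_decide]
          have hk' : ¬(a = lo ∧ b = lo) := fun ⟨x, y⟩ => hk (by rw [x, y])
          omega
      rw [ih ((s.length : Int) + 1 - (lo + 1)).toNat (by omega) (lo + 1) _ rfl (by omega) step a b,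
        decide_eq_decide]
      omega

lemma fold_diag1 (s : List Char) (m : Nat) : ∀ (lo : Int) (d : PySem.Dict (Int × Int) Bool),
    ((s.length : Int) - lo).toNat = m → 0 ≤ lo →
    (∀ a b : Int, PySem.Dict.getD d (a, b) false =
      decide ((0 ≤ a ∧ a ≤ (s.length : Int) ∧ b = a) ∨ (0 ≤ a ∧ a < lo ∧ b = a + 1))) →
    ∀ a b : Int, PySem.Dict.getD ((PySem.List.pyRange lo (s.length : Int) 1).foldl
        (fun pal i => PySem.Dict.insert pal (i, i + 1) true) d) (a, b) false
      = decide ((0 ≤ a ∧ a ≤ (s.length : Int) ∧ b = a) ∨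
                (0 ≤ a ∧ (a < lo ∨ a < (s.length : Int)) ∧ b = a + 1)) := by
  induction m using Nat.strong_induction_on with
  | _ m ih =>
    intro lo d hm hlo hd a b
    by_cases hend : (s.length : Int) ≤ lo
    · rw [PySem.List.pyRange_one_eq_nil hend, List.foldl_nil, hd a b]
      rw [decide_eq_decide]; omega
    · rw [PySem.List.pyRange_one_cons (by omega), List.foldl_cons]
      have step : ∀ a b : Int,
          PySem.Dict.getD (PySem.Dict.insert d (lo, lo + 1) true) (a, b) false =
            decide ((0 ≤ a ∧ a ≤ (s.length : Int) ∧ b = a) ∨ (0 ≤ a ∧ a < lo + 1 ∧ b = a + 1)) := by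
        intro a b
        rw [PySem.Dict.getD_insert]
        by_cases hk : ((a, b) : Int × Int) = (lo, lo + 1)
        · obtain ⟨rfl, rfl⟩ : a = lo ∧ b = lo + 1 := by simpa [Prod.ext_iff] using hk
          rw [if_pos rfl]; symm; rw [decide_eq_true_iff]
          exact Or.inr ⟨hlo, by omega, rfl⟩
        · rw [if_neg hk, hd a b, decide_eq_decide]
          have hk' : ¬(a = lo ∧ b = lo + 1) := fun ⟨x, y⟩ => hk (by rw [x, y])
          omega
      rw [ih ((s.length : Int) - (lo + 1)).toNat (by omega) (lo + 1) _ rfl (by omega) step a b,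
        decide_eq_decide]
      omega

lemma base1_good (s : List Char) : GoodUpTo s (palBase1 s) 1 := by
  have h0 : ∀ a b : Int, PySem.Dict.getD (PySem.Dict.empty : PySem.Dict (Int × Int) Bool) (a, b) false
      = decide (0 ≤ a ∧ a < 0 ∧ b = a) := by
    intro a b; rw [PySem.Dict.getD_empty]; symm; rw [decide_eq_false_iff_not]; omega
  have h1 := fold_diag0 s ((s.length : Int) + 1 - 0).toNat 0 PySem.Dict.empty rfl (le_refl 0) h0
  have h1' : ∀ a b : Int, PySem.Dict.getD (palBase0 s) (a, b) false =
      decide ((0 ≤ a ∧ a ≤ (s.length : Int) ∧ b = a) ∨ (0 ≤ a ∧ a < 0 ∧ b = a + 1)) := by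
    intro a b
    unfold palBase0
    rw [h1 a b, decide_eq_decide]; omega
  have h2 := fold_diag1 s ((s.length : Int) - 0).toNat 0 (palBase0 s) rfl (le_refl 0) h1'
  intro a b
  unfold palBase1
  rw [h2 a b]
  by_cases h : 0 ≤ a ∧ a ≤ b ∧ b ≤ (s.length : Int) ∧ b - a ≤ 1
  · rw [decide_eq_true h, Bool.true_and, isPal_short s a b h.1 h.2.1 (by omega)]
    rw [decide_eq_true_iff]; omega
  · rw [decide_eq_false h, Bool.false_and, decide_eq_false_iff_not]; omega

lemma inner_inv (s : List Char) (L : Int) (hL2 : 2 ≤ L) (_hLn : L ≤ (s.length : Int)) (m : Nat) :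
    ∀ (lo : Int) (d : PySem.Dict (Int × Int) Bool),
    ((s.length : Int) - L + 1 - lo).toNat = m → 0 ≤ lo →
    (∀ a b : Int, PySem.Dict.getD d (a, b) false =
      (decide (0 ≤ a ∧ a ≤ b ∧ b ≤ (s.length : Int) ∧ (b - a ≤ L - 1 ∨ (b - a = L ∧ a < lo))) &&
        isPalSpec s a b)) →
    GoodUpTo s ((PySem.List.pyRange lo ((s.length : Int) - L + 1) 1).foldl (fun pal i =>
      let j := i + L
      PySem.Dict.insert pal (i, j)
        (decide (PySem.List.pyGet? s i = PySem.List.pyGet? s (j - 1)) &&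
          PySem.Dict.getD pal (i + 1, j - 1) false)) d) L := by
  induction m using Nat.strong_induction_on with
  | _ m ih =>
    intro lo d hm hlo hd
    unfold GoodUpTo
    by_cases hend : (s.length : Int) - L + 1 ≤ lo
    · rw [PySem.List.pyRange_one_eq_nil hend, List.foldl_nil]
      intro a b
      rw [hd a b]
      congr 1
      rw [decide_eq_decide]; omega
    · rw [PySem.List.pyRange_one_cons (by omega), List.foldl_cons]
      have step : ∀ a b : Int,
          PySem.Dict.getD (PySem.Dict.insert d (lo, lo + L)
              (decide (PySem.List.pyGet? s lo = PySem.List.pyGet? s (lo + L - 1)) &&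
                PySem.Dict.getD d (lo + 1, lo + L - 1) false)) (a, b) false =
            (decide (0 ≤ a ∧ a ≤ b ∧ b ≤ (s.length : Int) ∧
                (b - a ≤ L - 1 ∨ (b - a = L ∧ a < lo + 1))) && isPalSpec s a b) := by
        intro a b
        rw [PySem.Dict.getD_insert]
        by_cases hk : ((a, b) : Int × Int) = (lo, lo + L)
        · have hab : a = lo ∧ b = lo + L := by simpa [Prod.ext_iff] using hk
          obtain ⟨rfl, rfl⟩ := hab
          rw [if_pos rfl, hd (a + 1) (a + L - 1)]
          have hc : decide (0 ≤ a + 1 ∧ a + 1 ≤ a + L - 1 ∧ a + L - 1 ≤ (s.length : Int) ∧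
              (a + L - 1 - (a + 1) ≤ L - 1 ∨ (a + L - 1 - (a + 1) = L ∧ a + 1 < a))) = true := by
            rw [decide_eq_true_iff]
            refine ⟨by omega, by omega, by omega, Or.inl (by omega)⟩
          rw [hc, Bool.true_and,
            ← pal_step s a (a + L) (by omega) (by omega) (by omega)]
          have hc2 : decide (0 ≤ a ∧ a ≤ a + L ∧ a + L ≤ (s.length : Int) ∧
              (a + L - a ≤ L - 1 ∨ (a + L - a = L ∧ a < a + 1))) = true := by
            rw [decide_eq_true_iff]
            refine ⟨by omega, by omega, by omega, Or.inr ⟨by omega, by omega⟩⟩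
          rw [hc2, Bool.true_and]
        · rw [if_neg hk, hd a b]
          have hk' : ¬(a = lo ∧ b = lo + L) := fun ⟨x, y⟩ => hk (by rw [x, y])
          congr 1
          rw [decide_eq_decide]; omega
      exact ih ((s.length : Int) - L + 1 - (lo + 1)).toNat (by omega) (lo + 1) _ rfl (by omega) step

lemma outer_inv (s : List Char) (m : Nat) : ∀ (L0 : Int) (d : PySem.Dict (Int × Int) Bool),
    ((s.length : Int) + 1 - L0).toNat = m → 2 ≤ L0 →
    GoodUpTo s d (L0 - 1) →
    GoodUpTo s ((PySem.List.pyRange L0 ((s.length : Int) + 1) 1).foldl (fun pal L =>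
      (PySem.List.pyRange 0 ((s.length : Int) - L + 1) 1).foldl (fun pal i =>
        let j := i + L
        PySem.Dict.insert pal (i, j)
          (decide (PySem.List.pyGet? s i = PySem.List.pyGet? s (j - 1)) &&
            PySem.Dict.getD pal (i + 1, j - 1) false)) pal) d)
      (max (L0 - 1) (s.length : Int)) := by
  induction m using Nat.strong_induction_on with
  | _ m ih =>
    intro L0 d hm hL0 hGood
    by_cases hend : (s.length : Int) + 1 ≤ L0
    · rw [PySem.List.pyRange_one_eq_nil hend, List.foldl_nil,
        max_eq_left (by omega : (s.length : Int) ≤ L0 - 1)]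
      exact hGood
    · rw [PySem.List.pyRange_one_cons (by omega), List.foldl_cons]
      have hd' : ∀ a b : Int, PySem.Dict.getD d (a, b) false =
          (decide (0 ≤ a ∧ a ≤ b ∧ b ≤ (s.length : Int) ∧
            (b - a ≤ L0 - 1 ∨ (b - a = L0 ∧ a < 0))) && isPalSpec s a b) := by
        intro a b
        rw [hGood a b]
        congr 1
        rw [decide_eq_decide]; omega
      have hstep := inner_inv s L0 hL0 (by omega)
        ((s.length : Int) - L0 + 1 - 0).toNat 0 d rfl (le_refl 0) hd'
      have hres := ih ((s.length : Int) + 1 - (L0 + 1)).toNat (by omega) (L0 + 1) _ rfl (by omega)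
        (by rw [show L0 + 1 - 1 = L0 by ring]; exact hstep)
      rw [max_eq_right (by omega : (L0 : Int) - 1 ≤ (s.length : Int))]
      rw [max_eq_right (by omega : (L0 : Int) + 1 - 1 ≤ (s.length : Int))] at hres
      exact hres

lemma table_good (s : List Char) : GoodUpTo s (palTable s) (max 1 (s.length : Int)) := by
  have h := outer_inv s ((s.length : Int) + 1 - 2).toNat 2 (palBase1 s) rfl (le_refl 2)
    (by rw [show (2 : Int) - 1 = 1 by norm_num]; exact base1_good s)
  rw [show (2 : Int) - 1 = 1 by norm_num] at h
  unfold palTable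
  exact h

-- per-(i,j) agreement of the two inner-loop bodies
lemma body_eq (s : List Char) (i j : Int) (h0 : 0 ≤ i) (hij : i + 2 ≤ j)
    (hj : j ≤ (s.length : Int)) (acc : List String) :
    (if (PySem.List.slice s (some i) (some j)) = (PySem.List.slice s (some i) (some j)).reverse ∧
        1 < (PySem.List.slice s (some i) (some j)).length then
      acc ++ [String.ofList (PySem.List.slice s (some i) (some j))]
    else acc) =
    (if PySem.Dict.getD (palTable s) (i, j) false then
      acc ++ [String.ofList (PySem.List.slice s (some i) (some j))]
    else acc) := by
  have hg := table_good s i j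
  have hcond : decide (0 ≤ i ∧ i ≤ j ∧ j ≤ (s.length : Int) ∧ j - i ≤ max 1 (s.length : Int)) = true := by
    rw [decide_eq_true_iff]
    refine ⟨h0, by omega, hj, ?_⟩
    have := le_max_right (1 : Int) (s.length : Int)
    omega
  rw [hcond, Bool.true_and] at hg
  have hlen : (PySem.List.slice s (some i) (some j)).length = j.toNat - i.toNat := by
    rw [PySem.List.slice_toNat s (by omega) (by omega)]
    rw [List.length_take, List.length_drop]; omega
  apply if_congr _ rfl rfl
  rw [hg]
  unfold isPalSpec
  constructor
  · intro ⟨h1, _⟩; exact decide_eq_true h1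
  · intro h; exact ⟨of_decide_eq_true h, by rw [hlen]; omega⟩

-- ===== VERDICT (by name: the statement is the Claim_ definition above) =====
theorem palindromes_spec : Claim_equal_palindromes := by
  intro input_string _
  unfold Spec_palindromes palindromes palindromes_alt
  apply PySem.List.foldl_congr_mem
  intro acc i hi
  have hi' : 0 ≤ i ∧ i < (input_string.toList.length : Int) := PySem.List.mem_pyRange_one.1 hi
  rw [PySem.List.pyRange_one_cons (by omega : i + 1 < (input_string.toList.length : Int) + 1)]
  rw [List.foldl_cons]
  have len1 : (PySem.List.slice input_string.toList (some i) (some (i + 1))).length = 1 := by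
    rw [PySem.List.slice_toNat input_string.toList (by omega) (by omega)]
    rw [List.length_take, List.length_drop]; omega
  rw [if_neg (by rw [len1]; rintro ⟨-, h⟩; omega)]
  have e12 : i + 1 + 1 = i + 2 := by ring
  rw [e12]
  apply PySem.List.foldl_congr_mem
  intro acc2 j hj
  have hj' := PySem.List.mem_pyRange_one.1 hj
  exact body_eq input_string.toList i j (by omega) (by omega) (by omega) acc2
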